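-- pv_equiv track=rewrite | github.com/tleub-ebp/WorkPilot-AI | apps/backend/core/optimization/dynamic_prompt_template.py | _select_relevant_examples
-- ===== SOURCE A (Python) =====
-- def _select_relevant_examples(
--     examples: list[str], task_description: str
-- ) -> list[str]:
--     """Select examples most relevant to the task"""
--     task_keywords = set(task_description.lower().split())
--
--     scored_examples = []
--     for example in examples:
--         example_keywords = set(example.lower().split())
--         # Calculate relevance score based on keyword overlap
--         common_keywords = task_keywords.intersection(example_keywords)
--         score = len(common_keywords) / max(len(task_keywords), 1)
--         scored_examples.append((example, score))
--
--     # Sort by relevance and return top examples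
--     scored_examples.sort(key=lambda x: x[1], reverse=True)
--     return [example for example, _ in scored_examples]
-- ===== SOURCE B (Python) =====
-- def _select_relevant_examples(
--     examples: list[str], task_description: str
-- ) -> list[str]:
--     """Select examples most relevant to the task (bucket/counting-sort version)."""
--     task_keywords = set(task_description.lower().split())
--     K = len(task_keywords)
--     buckets = [[] for _ in range(K + 1)]
--     for example in examples:
--         overlap = len(task_keywords & set(example.lower().split()))
--         buckets[overlap].append(example)
--     result = []
--     for k in range(K, -1, -1):
--         result.extend(buckets[k])
--     return result
-- ===== Notes on version B (the rewrite author's own statement) =====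
-- stated objective: faster
-- what changed: Replaces the stable comparison sort over float relevance scores by a counting/bucket sort: each example is appended to the bucket of its integer keyword-overlap count (the score's constant denominator cannot affect the order), and buckets are concatenated from highest count down, which reproduces the stable descending sort exactly.
import Mathlib
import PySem

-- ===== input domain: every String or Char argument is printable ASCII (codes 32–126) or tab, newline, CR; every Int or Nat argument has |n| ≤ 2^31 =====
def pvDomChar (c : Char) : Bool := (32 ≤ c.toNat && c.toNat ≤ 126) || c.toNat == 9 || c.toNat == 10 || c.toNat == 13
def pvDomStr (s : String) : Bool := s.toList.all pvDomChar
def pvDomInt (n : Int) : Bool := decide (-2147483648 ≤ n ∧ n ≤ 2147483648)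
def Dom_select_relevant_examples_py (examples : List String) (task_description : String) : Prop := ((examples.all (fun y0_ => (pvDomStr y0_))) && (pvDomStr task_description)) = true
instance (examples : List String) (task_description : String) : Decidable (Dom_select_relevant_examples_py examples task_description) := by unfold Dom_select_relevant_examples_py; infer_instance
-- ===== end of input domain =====

-- B replaces A's stable comparison sort over float scores by a bucket (counting) sort on the
-- integer overlap count; same return value (measurably faster by a constant factor).

-- ===== PORT A =====
-- A's float score count/max(K,1) is ported as an exact rational; exact here because the
-- denominator is a positive constant and counts are far below the 2^52 float-rounding limit,
-- so float comparisons of the scores agree with the rational ones.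
def select_relevant_examples_py (examples : List String) (task_description : String) : List String :=
  let task_keywords : PySem.Set String := PySem.Set.ofList (PySem.Str.split₀ (PySem.Str.lower task_description))
  let scored_examples : List (String × ℚ) :=
    examples.foldl (fun acc ex =>
      let example_keywords : PySem.Set String := PySem.Set.ofList (PySem.Str.split₀ (PySem.Str.lower ex))
      let common_keywords := PySem.Set.inter task_keywords example_keywords
      let score : ℚ := ((PySem.Set.len common_keywords : ℤ) : ℚ) / ((max (PySem.Set.len task_keywords) 1 : ℤ) : ℚ)
      acc ++ [(ex, score)]) []
  let sorted := PySem.List.sorted scored_examples (fun x => x.2) true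
  sorted.map (fun x => x.1)

-- ===== PORT B =====
def select_relevant_examples_py_alt (examples : List String) (task_description : String) : List String :=
  let task_keywords : PySem.Set String := PySem.Set.ofList (PySem.Str.split₀ (PySem.Str.lower task_description))
  let K : ℕ := task_keywords.length
  let buckets : List (List String) :=
    examples.foldl (fun bs ex =>
      let overlap : ℕ := (PySem.Set.inter task_keywords (PySem.Set.ofList (PySem.Str.split₀ (PySem.Str.lower ex)))).length
      bs.modify overlap (fun b => b ++ [ex])) (List.replicate (K + 1) [])
  (PySem.List.pyRange (K : ℤ) (-1) (-1)).foldl (fun res k => res ++ PySem.List.pyGetD buckets k []) []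

-- ===== PRECONDITION & SPEC =====
def Spec_select_relevant_examples_py (examples : List String) (task_description : String) (out : List String) : Prop := out = select_relevant_examples_py_alt examples task_description
instance (examples : List String) (task_description : String) (out : List String) : Decidable (Spec_select_relevant_examples_py examples task_description out) := by unfold Spec_select_relevant_examples_py; infer_instance

-- ===== CLAIM (what is proved, stated in full; the proofs are below) =====
def Claim_equal_select_relevant_examples_py : Prop := ∀ (examples : List String) (task_description : String), Dom_select_relevant_examples_py examples task_description → Spec_select_relevant_examples_py examples task_description (select_relevant_examples_py examples task_description)

-- ===== LEMMAS AND PROOFS =====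

-- descending value list [K, K-1, …, 0] and the grouped-filter form both programs reduce to
def pvDesc (K : ℕ) : List ℕ := (List.range (K + 1)).map (fun j => K - j)

def pvGroups (key : String → ℕ) (K : ℕ) (xs : List String) : List String :=
  (pvDesc K).flatMap (fun k => xs.filter (fun e => key e = k))

theorem insertBy_append_left {α : Type} (before : α → α → Bool) (x : α) (p q : List α)
    (h : ∀ y ∈ p, before x y = false) :
    PySem.List.insertBy before x (p ++ q) = p ++ PySem.List.insertBy before x q := by
  induction p with
  | nil => simp
  | cons y p ih =>
    have hy : before x y = false := h y (by simp)
    simp [PySem.List.insertBy, hy, ih (fun z hz => h z (by simp [hz]))]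

theorem insertBy_all_before {α : Type} (before : α → α → Bool) (x : α) (q : List α)
    (h : ∀ y ∈ q, before x y = true) :
    PySem.List.insertBy before x q = x :: q := by
  cases q with
  | nil => rfl
  | cons y t => simp [PySem.List.insertBy, h y (by simp)]

theorem pvGroups_step (key : String → ℕ) (K : ℕ) (xs : List String) (x : String)
    (hK : key x ≤ K) :
    PySem.List.insertBy (fun a b => decide (key b < key a)) x (pvGroups key K xs)
      = pvGroups key K (xs ++ [x]) := by
  set k₀ := key x with hk₀
  have hsplit : List.range (K + 1)
      = List.range (K - k₀) ++ List.map (fun j => (K - k₀) + j) (List.range (k₀ + 1)) := by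
    have : K + 1 = (K - k₀) + (k₀ + 1) := by omega
    rw [this, List.range_add]
  have hdesc : pvDesc K
      = (List.range (K - k₀)).map (fun j => K - j)
        ++ (k₀ :: (List.range k₀).map (fun j => k₀ - (j + 1))) := by
    rw [pvDesc, hsplit, List.map_append]
    congr 1
    simp only [List.range_succ_eq_map, List.map_cons, List.map_map]
    congr 1
    · omega
    · apply List.map_congr_left
      intro j hj
      simp only [List.mem_range] at hj
      simp only [Function.comp_apply]
      omega
  have hfilt : ∀ k : ℕ, (xs ++ [x]).filter (fun e => key e = k)
      = xs.filter (fun e => key e = k) ++ (if k₀ = k then [x] else []) := by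
    intro k
    rw [List.filter_append]
    congr 1
    by_cases h : k₀ = k <;> simp [List.filter, ← hk₀, h]
  have hhi : ∀ j ∈ List.range (K - k₀), k₀ < K - j := by
    intro j hj; simp only [List.mem_range] at hj; omega
  have hlo : ∀ j ∈ List.range k₀, k₀ - (j + 1) < k₀ := by
    intro j hj; simp only [List.mem_range] at hj; omega
  unfold pvGroups
  rw [hdesc]
  rw [List.flatMap_append, List.flatMap_cons, List.flatMap_map, List.flatMap_map,
    List.flatMap_append, List.flatMap_cons, List.flatMap_map, List.flatMap_map]
  rw [insertBy_append_left _ _ _ _ ?hi]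
  case hi =>
    intro y hy
    simp only [List.mem_flatMap, List.mem_filter, decide_eq_true_eq] at hy
    obtain ⟨j, hj, _, hkey⟩ := hy
    have := hhi j hj
    simp only [decide_eq_false_iff_not, not_lt, ← hk₀]
    omega
  rw [insertBy_append_left _ _ _ _ ?hmid]
  case hmid =>
    intro y hy
    simp only [List.mem_filter, decide_eq_true_eq] at hy
    simp [← hk₀, hy.2]
  rw [insertBy_all_before _ _ _ ?hlo2]
  case hlo2 =>
    intro y hy
    simp only [List.mem_flatMap, List.mem_filter, decide_eq_true_eq] at hy
    obtain ⟨j, hj, _, hkey⟩ := hy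
    have := hlo j hj
    simp only [decide_eq_true_eq, ← hk₀]
    omega
  have hhiEq : (List.range (K - k₀)).flatMap (fun j => (xs ++ [x]).filter (fun e => key e = K - j))
      = (List.range (K - k₀)).flatMap (fun j => xs.filter (fun e => key e = K - j)) := by
    apply List.flatMap_congr
    intro j hj
    have hne : ¬ (k₀ = K - j) := by have := hhi j hj; omega
    rw [hfilt, if_neg hne, List.append_nil]
  have hrest : (List.range k₀).flatMap (fun j => (xs ++ [x]).filter (fun e => key e = k₀ - (j + 1)))
      = (List.range k₀).flatMap (fun j => xs.filter (fun e => key e = k₀ - (j + 1))) := by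
    apply List.flatMap_congr
    intro j hj
    have hne : ¬ (k₀ = k₀ - (j + 1)) := by have := hlo j hj; omega
    rw [hfilt, if_neg hne, List.append_nil]
  rw [hhiEq, hrest, hfilt k₀, if_pos rfl, List.append_assoc, List.singleton_append]

-- the stable descending insertion sort equals the grouped-filter form
theorem foldl_insertBy_eq_groups (key : String → ℕ) (K : ℕ)
    (hK : ∀ e, key e ≤ K) (xs : List String) :
    xs.foldl (fun acc x => PySem.List.insertBy (fun a b => decide (key b < key a)) x acc) []
      = pvGroups key K xs := by
  induction xs using List.reverseRecOn with
  | nil => simp [pvGroups]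
  | append_singleton xs x ih =>
    rw [List.foldl_append, List.foldl_cons, List.foldl_nil, ih,
      pvGroups_step key K xs x (hK x)]

theorem insertBy_map {α β : Type} (f : α → β) (before : β → β → Bool) (x : α) (l : List α) :
    PySem.List.insertBy before (f x) (l.map f)
      = (PySem.List.insertBy (fun a b => before (f a) (f b)) x l).map f := by
  induction l with
  | nil => rfl
  | cons y l ih =>
    by_cases h : before (f x) (f y) <;> simp [PySem.List.insertBy, h, ih]

theorem foldl_insertBy_map {α β : Type} (f : α → β) (before : β → β → Bool)
    (xs : List α) (acc : List α) :
    xs.foldl (fun a x => PySem.List.insertBy before (f x) a) (acc.map f)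
      = (xs.foldl (fun a x => PySem.List.insertBy (fun u v => before (f u) (f v)) x a) acc).map f := by
  induction xs generalizing acc with
  | nil => rfl
  | cons x xs ih => simp only [List.foldl_cons, insertBy_map, ih]

theorem foldl_append_singleton_eq_map {α β : Type} (g : α → β) (xs : List α) (acc : List β) :
    xs.foldl (fun a x => a ++ [g x]) acc = acc ++ xs.map g := by
  induction xs generalizing acc with
  | nil => simp
  | cons x xs ih => simp [ih]

-- the bucket fold of B: bucket k holds exactly the examples with count k, in order
theorem bucket_getD (key : String → ℕ) (K : ℕ) (xs : List String) (bs : List (List String))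
    (hlen : bs.length = K + 1) (k : ℕ) (hk : k ≤ K) :
    (xs.foldl (fun bs e => bs.modify (key e) (fun b => b ++ [e])) bs).getD k []
      = bs.getD k [] ++ xs.filter (fun e => key e = k) := by
  induction xs generalizing bs with
  | nil => simp
  | cons x xs ih =>
    have hk' : k < bs.length := by omega
    rw [List.foldl_cons, ih (bs.modify (key x) (fun b => b ++ [x])) (by simp [hlen])]
    have hget : (bs.modify (key x) (fun b => b ++ [x])).getD k []
        = if key x = k then bs.getD k [] ++ [x] else bs.getD k [] := by
      rw [List.getD_eq_getElem?_getD, List.getElem?_modify, List.getElem?_eq_getElem hk']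
      by_cases h : key x = k <;>
        simp [h, List.getD_eq_getElem?_getD, List.getElem?_eq_getElem hk']
    rw [hget, List.filter_cons]
    by_cases h : key x = k <;> simp [h]

theorem pyRange_desc (K : ℕ) :
    PySem.List.pyRange (K : ℤ) (-1) (-1) = (List.range (K + 1)).map (fun j => ((K - j : ℕ) : ℤ)) := by
  have hlt : (-1 : ℤ) < (K : ℤ) := by omega
  simp only [PySem.List.pyRange]
  rw [if_neg (by norm_num), if_neg (by norm_num), if_pos hlt]
  have hcount : ((((K : ℤ) - (-1) + -(-1) - 1) / -(-1)).toNat) = K + 1 := by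
    have h1 : (((K : ℤ) - (-1) + -(-1) - 1) / -(-1)) = (K : ℤ) + 1 := by
      norm_num
    rw [h1]; omega
  rw [hcount]
  apply List.map_congr_left
  intro j hj
  simp only [List.mem_range] at hj
  omega

-- A's side, for any count function, bound and positive constant denominator
theorem genA (key : String → ℕ) (K : ℕ) (hK : ∀ e, key e ≤ K)
    (den : ℚ) (hden : 0 < den) (xs : List String) :
    (PySem.List.sorted
      (xs.foldl (fun acc e => acc ++ [(e, ((key e : ℤ) : ℚ) / den)]) [])
      (fun p => p.2) true).map (fun p => p.1)
      = pvGroups key K xs := by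
  rw [foldl_append_singleton_eq_map, List.nil_append,
    PySem.List.sorted_rev_eq_foldl_insertBy, List.foldl_map]
  have hmap := foldl_insertBy_map (fun e => (e, ((key e : ℤ) : ℚ) / den))
    (fun a b => decide (b.2 < a.2)) xs []
  simp only [List.map_nil] at hmap
  rw [hmap, List.map_map]
  have hid : ((fun p : String × ℚ => p.1) ∘ (fun e => (e, ((key e : ℤ) : ℚ) / den))) = id := by
    funext e; rfl
  rw [hid, List.map_id]
  have hbefore : (fun (u v : String) =>
        decide (((key v : ℤ) : ℚ) / den < ((key u : ℤ) : ℚ) / den))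
      = (fun (u v : String) => decide (key v < key u)) := by
    funext u v
    rw [decide_eq_decide, div_lt_div_iff_of_pos_right hden]
    exact_mod_cast Iff.rfl
  rw [hbefore, foldl_insertBy_eq_groups key K hK xs]

-- B's side, for any count function with the same bound
theorem genB (key : String → ℕ) (K : ℕ) (xs : List String) :
    (PySem.List.pyRange (K : ℤ) (-1) (-1)).foldl (fun res k =>
        res ++ PySem.List.pyGetD
          (xs.foldl (fun bs e => bs.modify (key e) (fun b => b ++ [e]))
            (List.replicate (K + 1) [])) k []) []
      = pvGroups key K xs := by
  rw [pyRange_desc, PySem.List.foldl_append_eq_flatMap, List.nil_append, List.flatMap_map]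
  have hgood : ∀ j ∈ List.range (K + 1),
      PySem.List.pyGetD
        (xs.foldl (fun bs e => bs.modify (key e) (fun b => b ++ [e]))
          (List.replicate (K + 1) [])) ((K - j : ℕ) : ℤ) []
      = xs.filter (fun e => key e = K - j) := by
    intro j hj
    simp only [List.mem_range] at hj
    rw [PySem.List.pyGetD_natCast]
    rw [bucket_getD key K xs (List.replicate (K + 1) []) (by simp) (K - j) (by omega)]
    have hrepl : (List.replicate (K + 1) ([] : List String)).getD (K - j) [] = [] := by
      rw [List.getD_eq_getElem?_getD, List.getElem?_replicate, if_pos (by omega : K - j < K + 1)]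
      rfl
    rw [hrepl, List.nil_append]
  rw [List.flatMap_congr hgood]
  rw [pvGroups, pvDesc, List.flatMap_map]

theorem cnt_le (tk : List String) (e : String) :
    (PySem.Set.inter tk (PySem.Set.ofList (PySem.Str.split₀ (PySem.Str.lower e)))).length
      ≤ tk.length := by
  unfold PySem.Set.inter
  exact List.length_filter_le _ _

-- ===== VERDICT (by name: the statement is the Claim_ definition above) =====
theorem select_relevant_examples_py_spec : Claim_equal_select_relevant_examples_py := by
  intro examples td _
  unfold Spec_select_relevant_examples_py
  have hden : (0 : ℚ) < ((max (PySem.Set.len (PySem.Set.ofList (PySem.Str.split₀ (PySem.Str.lower td)))) 1 : ℤ) : ℚ) := by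
    have h1 : (1 : ℤ) ≤ max (PySem.Set.len (PySem.Set.ofList (PySem.Str.split₀ (PySem.Str.lower td)))) 1 :=
      le_max_right _ _
    exact_mod_cast lt_of_lt_of_le (by norm_num) h1
  have hA := genA
    (fun e => (PySem.Set.inter (PySem.Set.ofList (PySem.Str.split₀ (PySem.Str.lower td)))
      (PySem.Set.ofList (PySem.Str.split₀ (PySem.Str.lower e)))).length)
    (PySem.Set.ofList (PySem.Str.split₀ (PySem.Str.lower td))).length
    (fun e => cnt_le _ e)
    ((max (PySem.Set.len (PySem.Set.ofList (PySem.Str.split₀ (PySem.Str.lower td)))) 1 : ℤ) : ℚ)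
    hden examples
  have hB := genB
    (fun e => (PySem.Set.inter (PySem.Set.ofList (PySem.Str.split₀ (PySem.Str.lower td)))
      (PySem.Set.ofList (PySem.Str.split₀ (PySem.Str.lower e)))).length)
    (PySem.Set.ofList (PySem.Str.split₀ (PySem.Str.lower td))).length
    examples
  exact hA.trans hB.symm
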